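-- pv_equiv track=rewrite | github.com/Iamtheproblem-dev/Japanese-translation | choosing_v2.py | convert_from_chosen_map
-- ===== SOURCE A (Python) =====
-- def replace_text(text: str, mapping: dict) -> str:
--     result = []
--     i = 0
--     keys = sorted(mapping.keys(), key=len, reverse=True)
--     while i < len(text):
--         for k in keys:
--             if text.startswith(k, i):
--                 result.append(mapping[k])
--                 i += len(k)
--                 break
--         else:
--             result.append(text[i])
--             i += 1
--     return ''.join(result)
--
-- def convert_from_chosen_map(text: str, chosen_map: dict) -> list[str]:
--
--     paragraphs = []
--     cumulative = {}
--     keys = sorted(chosen_map.keys(), key=len, reverse=True)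
--
--     for i in range(0, len(keys), 2):
--         added = False
--
--         # Try to add key i
--         k1 = keys[i]
--         if k1 in text:
--             cumulative[k1] = chosen_map[k1]
--             added = True
--
--         # Try to add key i+1
--         if i + 1 < len(keys):
--             k2 = keys[i + 1]
--             if k2 in text:
--                 cumulative[k2] = chosen_map[k2]
--                 added = True
--
--         if added:
--             converted = replace_text(text, cumulative)
--             paragraphs.append(converted)
--
--     return paragraphs
-- ===== SOURCE B (Python) =====
-- def convert_from_chosen_map(text: str, chosen_map: dict) -> list[str]:
--     keys = sorted(chosen_map.keys(), key=len, reverse=True)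
--     selected = set()    # keys activated so far
--     prefixes = set()    # every nonempty prefix of an activated key (a flat trie)
--     n = len(text)
--
--     def longest(i):
--         # longest L with text[i:i+L] an activated key, by walking the prefix trie
--         best = 0
--         p = ''
--         j = i
--         while j < n:
--             p += text[j]
--             if p not in prefixes:
--                 break
--             j += 1
--             if p in selected:
--                 best = j - i
--         return best
--
--     def stage():
--         parts = []
--         i = 0
--         while i < n:
--             L = longest(i)
--             if L:
--                 parts.append(chosen_map[text[i:i+L]])
--                 i += L
--             else:
--                 parts.append(text[i])
--                 i += 1
--         return ''.join(parts)
--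
--     paragraphs = []
--     for j in range(0, len(keys), 2):
--         hits = [k for k in keys[j:j+2] if k in text]
--         if hits:
--             for k in hits:
--                 selected.add(k)
--                 for e in range(len(k)):
--                     prefixes.add(k[:e+1])
--             paragraphs.append(stage())
--     return paragraphs
-- ===== Notes on version B (the rewrite author's own statement) =====
-- stated objective: faster
-- what changed: The per-stage replacement no longer scans the whole sorted cumulative key list with startswith at every position: B keeps a flat trie (the set of all prefixes of the activated keys) and finds the longest match at a position by extending the candidate one character at a time while it is still a prefix of some key, so each stage costs O(n*L) independent of the number of keys.
-- outside the precondition, e.g. on convert_from_chosen_map('aaa', {'a': 'x', '': 'y'}): A returns ['xxx'], B returns ['xxx']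
import Mathlib
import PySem

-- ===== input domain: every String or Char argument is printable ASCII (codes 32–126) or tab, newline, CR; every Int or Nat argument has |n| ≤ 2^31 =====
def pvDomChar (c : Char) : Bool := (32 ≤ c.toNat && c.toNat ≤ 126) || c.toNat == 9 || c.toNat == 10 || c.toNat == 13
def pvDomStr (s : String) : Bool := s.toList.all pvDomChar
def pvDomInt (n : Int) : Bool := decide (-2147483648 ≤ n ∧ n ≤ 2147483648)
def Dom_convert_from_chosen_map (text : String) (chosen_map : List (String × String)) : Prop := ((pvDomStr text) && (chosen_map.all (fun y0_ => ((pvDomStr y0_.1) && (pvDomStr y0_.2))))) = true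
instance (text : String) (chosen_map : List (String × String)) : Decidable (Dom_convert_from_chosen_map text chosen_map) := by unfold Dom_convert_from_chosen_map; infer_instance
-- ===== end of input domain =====

-- B replaces A's per-stage scan of the whole sorted cumulative key list (startswith with every
-- key at every position) by a flat trie: a set of all prefixes of the activated keys is kept,
-- and the longest match at a position is found by extending the match one character at a time
-- while it is still a prefix of some key (objective: faster, independent of the number of keys).

-- ===== PORT A =====

-- text.startswith(k, i) for 0 ≤ i ≤ len(text): exact, Python tests whether k is a prefix of text[i:].
def pvStartsAtA (cs : List Char) (k : List Char) (i : Nat) : Bool :=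
  PySem.Chars.startswith (cs.drop i) k

-- the while-loop of replace_text; fuel = len(text) bounds the iterations (each one advances
-- i by at least 1 whenever every key is nonempty, which Pre_ guarantees).
-- mapping[k] is ported as getD _ "" — k is always a key of the mapping here, so it is exact.
def pvReplaceGoA (cs : List Char) (keys : List String) (m : PySem.Dict String String)
    (i : Nat) (fuel : Nat) (acc : List Char) : List Char :=
  match fuel with
  | 0 => acc
  | fuel + 1 =>
    if i < cs.length then
      match keys.find? (fun k => pvStartsAtA cs k.toList i) with
      | some k => pvReplaceGoA cs keys m (i + k.toList.length) fuel (acc ++ (m.getD k "").toList)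
      | none   => pvReplaceGoA cs keys m (i + 1) fuel (acc ++ (cs.drop i).take 1)
    else acc

-- replace_text(text, mapping); ''.join(result) is the concatenation accumulated in acc.
def pvReplaceTextA (text : String) (m : PySem.Dict String String) : String :=
  String.ofList (pvReplaceGoA text.toList
    (PySem.List.sorted m.keys (fun k => k.toList.length) true) m 0 text.toList.length [])

-- the 'for i in range(0, len(keys), 2)' loop, consuming keys two at a time.
def pvStagesA (text : String) (d : PySem.Dict String String) :
    PySem.Dict String String → List String → List String
  | _, [] => []
  | cum, k1 :: rest =>
    let cum1 := if PySem.Str.isIn k1 text then cum.insert k1 (d.getD k1 "") else cum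
    let added1 := PySem.Str.isIn k1 text
    match rest with
    | [] => if added1 then [pvReplaceTextA text cum1] else []
    | k2 :: rest2 =>
      let cum2 := if PySem.Str.isIn k2 text then cum1.insert k2 (d.getD k2 "") else cum1
      let added := added1 || PySem.Str.isIn k2 text
      (if added then [pvReplaceTextA text cum2] else []) ++ pvStagesA text d cum2 rest2

def convert_from_chosen_map (text : String) (chosen_map : List (String × String)) : List String :=
  let d := PySem.Dict.ofList chosen_map
  pvStagesA text d PySem.Dict.empty (PySem.List.sorted d.keys (fun k => k.toList.length) true)

-- ===== PORT B =====

-- the while-loop of longest(i): extend the candidate p one character at a time while it is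
-- still in the prefix set, recording the length whenever p is an activated key.
-- fuel = len(text) - j bounds the iterations (j grows by 1 each round).
def pvWalkB (cs : List Char) (prefixes selected : PySem.Set String)
    (i j : Nat) (p : List Char) (best : Nat) (fuel : Nat) : Nat :=
  match fuel with
  | 0 => best
  | fuel + 1 =>
    if h : j < cs.length then
      let p' := p ++ [cs[j]]
      if PySem.Set.contains prefixes (String.ofList p') then
        if PySem.Set.contains selected (String.ofList p') then
          pvWalkB cs prefixes selected i (j + 1) p' (j + 1 - i) fuel
        else
          pvWalkB cs prefixes selected i (j + 1) p' best fuel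
      else best
    else best

-- the while-loop of stage(); chosen_map[text[i:i+L]] is ported as getD _ "" — the slice is
-- always a key of the map here, so it is exact.
def pvStageGoB (cs : List Char) (prefixes selected : PySem.Set String)
    (d : PySem.Dict String String) (i : Nat) (fuel : Nat) (acc : List Char) : List Char :=
  match fuel with
  | 0 => acc
  | fuel + 1 =>
    if i < cs.length then
      let L := pvWalkB cs prefixes selected i i [] 0 (cs.length - i)
      if L ≠ 0 then
        pvStageGoB cs prefixes selected d (i + L) fuel
          (acc ++ (d.getD (String.ofList ((cs.drop i).take L)) "").toList)
      else
        pvStageGoB cs prefixes selected d (i + 1) fuel (acc ++ (cs.drop i).take 1)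
    else acc

-- 'selected.add(k); for e in range(len(k)): prefixes.add(k[:e+1])' for one hit k.
def pvAddKeyB (st : PySem.Set String × PySem.Set String) (k : String) :
    PySem.Set String × PySem.Set String :=
  (PySem.Set.add st.1 k,
   (List.range k.toList.length).foldl
     (fun pre e => PySem.Set.add pre (String.ofList (k.toList.take (e + 1)))) st.2)

-- the 'for j in range(0, len(keys), 2)' loop of B, consuming keys two at a time;
-- st = (selected, prefixes).
def pvStagesB (text : String) (d : PySem.Dict String String) :
    (PySem.Set String × PySem.Set String) → List String → List String
  | _, [] => []
  | st, k1 :: rest =>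
    let hits := (k1 :: rest.take 1).filter (fun k => PySem.Str.isIn k text)
    let st' := hits.foldl pvAddKeyB st
    (if hits.isEmpty then []
     else [String.ofList (pvStageGoB text.toList st'.2 st'.1 d 0 text.toList.length [])]) ++
      (match rest with
       | [] => []
       | _ :: rest2 => pvStagesB text d st' rest2)

def convert_from_chosen_map_alt (text : String) (chosen_map : List (String × String)) : List String :=
  let d := PySem.Dict.ofList chosen_map
  pvStagesB text d (PySem.Set.empty, PySem.Set.empty)
    (PySem.List.sorted d.keys (fun k => k.toList.length) true)

-- ===== PRECONDITION & SPEC =====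

-- Pre_ excludes maps that contain the empty-string key together with a nonempty text: on such
-- inputs A's replacement loop can stop advancing (the empty key matches everywhere and adds 0
-- to i), so A diverges on every text position not covered by a longer key. This also excludes
-- some inputs on which A happens to return (every position covered by a nonempty key) — see
-- the cite in claim.json.
def Pre_convert_from_chosen_map (text : String) (chosen_map : List (String × String)) : Prop :=
  (∀ p ∈ chosen_map, p.1 ≠ "") ∨ text = ""
instance (text : String) (chosen_map : List (String × String)) : Decidable (Pre_convert_from_chosen_map text chosen_map) := by unfold Pre_convert_from_chosen_map; infer_instance

def pvWitness_convert_from_chosen_map : String × (List (String × String)) :=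
  ("abc ab c", [("ab", "X"), ("c", "Y")])

def Spec_convert_from_chosen_map (text : String) (chosen_map : List (String × String)) (out : List String) : Prop := out = convert_from_chosen_map_alt text chosen_map
instance (text : String) (chosen_map : List (String × String)) (out : List String) : Decidable (Spec_convert_from_chosen_map text chosen_map out) := by unfold Spec_convert_from_chosen_map; infer_instance

-- ===== CLAIM (what is proved, stated in full; the proofs are below) =====
def Claim_equal_convert_from_chosen_map : Prop := ∀ (text : String) (chosen_map : List (String × String)), Dom_convert_from_chosen_map text chosen_map → Pre_convert_from_chosen_map text chosen_map → Spec_convert_from_chosen_map text chosen_map (convert_from_chosen_map text chosen_map)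

-- ===== LEMMAS AND PROOFS =====

-- A's startswith test characterised as a take of the suffix.
theorem pv_p_iff (cs : List Char) (k : String) (i : Nat) :
    pvStartsAtA cs k.toList i = true ↔ k.toList = (cs.drop i).take k.toList.length := by
  rw [pvStartsAtA, PySem.Chars.startswith_iff, List.prefix_iff_eq_take]

theorem pv_p_len (cs : List Char) (k : String) (i : Nat)
    (h : pvStartsAtA cs k.toList i = true) : k.toList.length ≤ cs.length - i := by
  have := (pv_p_iff cs k i).mp h
  have hlen : k.toList.length = min k.toList.length (cs.length - i) := by
    conv_lhs => rw [this]
    rw [List.length_take, List.length_drop]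
  omega

-- the candidate p tracked by the walk: take (t) ++ [next char] = take (t+1).
theorem pv_take_snoc (cs : List Char) (i j : Nat) (hi : i ≤ j) (hj : j < cs.length) :
    (cs.drop i).take (j - i) ++ [cs[j]] = (cs.drop i).take (j - i + 1) := by
  have ht : j - i < (cs.drop i).length := by rw [List.length_drop]; omega
  have h2 : (cs.drop i)[j - i]'ht = cs[j] := by
    rw [List.getElem_drop]
    congr 1
    omega
  rw [List.take_add_one, List.getElem?_eq_getElem ht, h2]
  rfl

-- structural unfolding of one step of the walk (the let written out).
theorem pvWalkB_succ (cs : List Char) (prefixes selected : PySem.Set String)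
    (i j : Nat) (p : List Char) (best : Nat) (fuel : Nat) :
    pvWalkB cs prefixes selected i j p best (fuel + 1) =
      if h : j < cs.length then
        (if PySem.Set.contains prefixes (String.ofList (p ++ [cs[j]])) then
          (if PySem.Set.contains selected (String.ofList (p ++ [cs[j]])) then
            pvWalkB cs prefixes selected i (j + 1) (p ++ [cs[j]]) (j + 1 - i) fuel
          else pvWalkB cs prefixes selected i (j + 1) (p ++ [cs[j]]) best fuel)
        else best)
      else best := rfl

-- if no activated key matches at i, the walk never updates best.
theorem pv_walk_none (cs : List Char) (prefixes selected : PySem.Set String) (i : Nat)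
    (H : ∀ e, 1 ≤ e → i + e ≤ cs.length →
      PySem.Set.contains selected (String.ofList ((cs.drop i).take e)) = false) :
    ∀ (fuel j : Nat) (best : Nat), i ≤ j →
      pvWalkB cs prefixes selected i j ((cs.drop i).take (j - i)) best fuel = best := by
  intro fuel
  induction fuel with
  | zero => intro j best _; rfl
  | succ fuel ih =>
    intro j best hij
    rw [pvWalkB_succ]
    by_cases hj : j < cs.length
    · rw [dif_pos hj, pv_take_snoc cs i j hij hj]
      have hsel := H (j - i + 1) (by omega) (by omega)
      rw [hsel]
      simp only [Bool.false_eq_true, if_false]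
      split
      · have := ih (j + 1) best (by omega)
        simpa [Nat.succ_sub hij] using this
      · rfl
    · rw [dif_neg hj]

-- once best = L0 and no activated key longer than L0 matches at i, the walk keeps best = L0.
theorem pv_walk_capped (cs : List Char) (prefixes selected : PySem.Set String) (i L0 : Nat)
    (Hcap : ∀ e, 1 ≤ e → i + e ≤ cs.length →
      PySem.Set.contains selected (String.ofList ((cs.drop i).take e)) = true → e ≤ L0) :
    ∀ (fuel j : Nat), i + L0 ≤ j →
      pvWalkB cs prefixes selected i j ((cs.drop i).take (j - i)) L0 fuel = L0 := by
  intro fuel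
  induction fuel with
  | zero => intro j _; rfl
  | succ fuel ih =>
    intro j hj
    rw [pvWalkB_succ]
    by_cases hjl : j < cs.length
    · rw [dif_pos hjl, pv_take_snoc cs i j (by omega) hjl]
      have hselF : PySem.Set.contains selected
          (String.ofList ((cs.drop i).take (j - i + 1))) = false := by
        rw [← Bool.not_eq_true]
        intro hselt
        exact absurd (Hcap (j - i + 1) (by omega) (by omega) hselt) (by omega)
      rw [hselF]
      simp only [Bool.false_eq_true, if_false]
      split
      · have := ih (j + 1) (by omega)
        simpa [Nat.succ_sub (show i ≤ j by omega)] using this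
      · rfl
    · rw [dif_neg hjl]

-- if the longest activated key matching at i has length L0, the walk reaches it and returns L0.
theorem pv_walk_reach (cs : List Char) (prefixes selected : PySem.Set String) (i L0 : Nat)
    (hL0 : 1 ≤ L0) (hlen : i + L0 ≤ cs.length)
    (Hsel : PySem.Set.contains selected (String.ofList ((cs.drop i).take L0)) = true)
    (Hpref : ∀ e, 1 ≤ e → e ≤ L0 →
      PySem.Set.contains prefixes (String.ofList ((cs.drop i).take e)) = true)
    (Hcap : ∀ e, 1 ≤ e → i + e ≤ cs.length →
      PySem.Set.contains selected (String.ofList ((cs.drop i).take e)) = true → e ≤ L0) :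
    ∀ (fuel t best : Nat), t < L0 → cs.length - (i + t) ≤ fuel →
      pvWalkB cs prefixes selected i (i + t) ((cs.drop i).take t) best fuel = L0 := by
  intro fuel
  induction fuel with
  | zero => intro t best ht hf; omega
  | succ fuel ih =>
    intro t best ht hf
    have hjl : i + t < cs.length := by omega
    have hsnoc : (cs.drop i).take t ++ [cs[i + t]] = (cs.drop i).take (t + 1) := by
      have := pv_take_snoc cs i (i + t) (by omega) hjl
      simpa [Nat.add_sub_cancel_left] using this
    rw [pvWalkB_succ, dif_pos hjl, hsnoc,
      if_pos (Hpref (t + 1) (by omega) (by omega))]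
    have hstep : ∀ b : Nat, t + 1 < L0 →
        pvWalkB cs prefixes selected i (i + t + 1) ((cs.drop i).take (t + 1)) b fuel = L0 := by
      intro b hL
      have := ih (t + 1) b (by omega) (by omega)
      simpa [show i + (t + 1) = i + t + 1 by omega] using this
    by_cases hL : t + 1 = L0
    · subst hL
      rw [if_pos Hsel]
      have hbest : i + t + 1 - i = t + 1 := by omega
      rw [hbest]
      have := pv_walk_capped cs prefixes selected i (t + 1) Hcap fuel (i + (t + 1)) le_rfl
      simpa [show i + (t + 1) = i + t + 1 by omega,
        show i + t + 1 - i = t + 1 by omega] using this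
    · by_cases hselc : PySem.Set.contains selected
          (String.ofList ((cs.drop i).take (t + 1))) = true
      · rw [if_pos hselc]
        exact hstep _ (by omega)
      · rw [if_neg hselc]
        exact hstep _ (by omega)

-- membership in a fold of Set.add over a list.
theorem pv_mem_foldl_add {β : Type} (f : β → String) :
    ∀ (l : List β) (s : PySem.Set String) (x : String),
      x ∈ l.foldl (fun s e => PySem.Set.add s (f e)) s ↔ x ∈ s ∨ ∃ e ∈ l, x = f e := by
  intro l
  induction l with
  | nil => intro s x; simp
  | cons b l ih =>
    intro s x
    rw [List.foldl_cons, ih]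
    rw [PySem.Set.mem_add]
    constructor
    · rintro (⟨h | h⟩ | ⟨e, he, hx⟩)
      · exact Or.inl h
      · exact Or.inr ⟨b, by simp, h⟩
      · exact Or.inr ⟨e, by simp [he], hx⟩
    · rintro (h | ⟨e, he, hx⟩)
      · exact Or.inl (Or.inl h)
      · rcases List.mem_cons.mp he with rfl | he'
        · exact Or.inl (Or.inr hx)
        · exact Or.inr ⟨e, he', hx⟩

-- the two components of the fold of pvAddKeyB.
theorem pv_foldl_addkey_fst :
    ∀ (hits : List String) (st : PySem.Set String × PySem.Set String),
      (hits.foldl pvAddKeyB st).1 = hits.foldl (fun s k => PySem.Set.add s k) st.1 := by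
  intro hits
  induction hits with
  | nil => intro st; rfl
  | cons k hits ih => intro st; rw [List.foldl_cons, List.foldl_cons, ih]; rfl

theorem pv_foldl_addkey_snd :
    ∀ (hits : List String) (st : PySem.Set String × PySem.Set String),
      (hits.foldl pvAddKeyB st).2 = hits.foldl
        (fun pre k => (List.range k.toList.length).foldl
          (fun pre e => PySem.Set.add pre (String.ofList (k.toList.take (e + 1)))) pre) st.2 := by
  intro hits
  induction hits with
  | nil => intro st; rfl
  | cons k hits ih => intro st; rw [List.foldl_cons, List.foldl_cons, ih]; rfl

-- membership in the prefix set after processing a list of hits.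
theorem pv_mem_preffold (hits : List String) (s : PySem.Set String) (x : String) :
    x ∈ hits.foldl
        (fun pre k => (List.range k.toList.length).foldl
          (fun pre e => PySem.Set.add pre (String.ofList (k.toList.take (e + 1)))) pre) s
      ↔ x ∈ s ∨ ∃ k ∈ hits, ∃ e, e < k.toList.length ∧ x = String.ofList (k.toList.take (e + 1)) := by
  induction hits generalizing s with
  | nil => simp
  | cons k hits ih =>
    rw [List.foldl_cons, ih, pv_mem_foldl_add]
    constructor
    · rintro (⟨h | ⟨e, he, hx⟩⟩ | ⟨k', hk', e, he, hx⟩)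
      · exact Or.inl h
      · exact Or.inr ⟨k, by simp, e, by simpa using he, hx⟩
      · exact Or.inr ⟨k', by simp [hk'], e, he, hx⟩
    · rintro (h | ⟨k', hk', e, he, hx⟩)
      · exact Or.inl (Or.inl h)
      · rcases List.mem_cons.mp hk' with rfl | hk''
        · exact Or.inl (Or.inr ⟨e, by simpa using he, hx⟩)
        · exact Or.inr ⟨k', hk'', e, he, hx⟩

-- the first match in a length-descending list is a longest match.
theorem pv_find_max (cs : List Char) (present : List String) (i : Nat) (kstar : String)
    (hpw : present.Pairwise (fun a b => b.toList.length ≤ a.toList.length))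
    (hA : present.find? (fun k => pvStartsAtA cs k.toList i) = some kstar)
    (s : String) (hs : s ∈ present) (hps : pvStartsAtA cs s.toList i = true) :
    s.toList.length ≤ kstar.toList.length := by
  rcases List.find?_eq_some_iff_getElem.mp hA with ⟨hpk, idx, hidx, hgetk, hbefore⟩
  rcases List.mem_iff_getElem.mp hs with ⟨m, hm, hgets⟩
  rcases lt_trichotomy m idx with hlt | heq | hgtm
  · have := hbefore m hlt
    rw [hgets] at this
    simp [hps] at this
  · subst heq
    rw [← hgets, hgetk]
  · have := List.pairwise_iff_getElem.mp hpw idx m hidx hm hgtm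
    rw [hgets, hgetk] at this
    exact this

-- slice of length e is a matching key when it is in present.
theorem pv_slice_matches (cs : List Char) (i e : Nat) (he1 : 1 ≤ e) (he2 : i + e ≤ cs.length) :
    (String.ofList ((cs.drop i).take e)).toList = (cs.drop i).take e ∧
    pvStartsAtA cs (String.ofList ((cs.drop i).take e)).toList i = true ∧
    (String.ofList ((cs.drop i).take e)).toList.length = e := by
  have htl : (String.ofList ((cs.drop i).take e)).toList = (cs.drop i).take e :=
    String.toList_ofList
  have hlen : (String.ofList ((cs.drop i).take e)).toList.length = e := by
    rw [htl, List.length_take, List.length_drop]; omega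
  refine ⟨htl, ?_, hlen⟩
  rw [pv_p_iff, hlen, htl]

theorem pv_keys_eq (d : PySem.Dict String String) (present : List String)
    (cum : PySem.Dict String String)
    (hcum : cum.items = present.map (fun k => (k, d.getD k ""))) :
    cum.keys = present := by
  simp [PySem.Dict.keys, hcum, List.map_map, Function.comp_def]

-- the replacement engines agree position by position.
theorem pv_engine_eq (cs : List Char) (present : List String)
    (selected prefixes : PySem.Set String) (cum d : PySem.Dict String String)
    (hnd : present.Nodup)
    (hpw : present.Pairwise (fun a b => b.toList.length ≤ a.toList.length))
    (hcum : cum.items = present.map (fun k => (k, d.getD k "")))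
    (hsel : ∀ s, PySem.Set.contains selected s = true ↔ s ∈ present)
    (hpref : ∀ k ∈ present, ∀ e, 1 ≤ e → e ≤ k.toList.length →
      PySem.Set.contains prefixes (String.ofList (k.toList.take e)) = true)
    (hne : ∀ k ∈ present, k ≠ "") :
    ∀ (fuel i : Nat) (acc : List Char),
      pvReplaceGoA cs present cum i fuel acc = pvStageGoB cs prefixes selected d i fuel acc := by
  intro fuel
  induction fuel with
  | zero => intro i acc; rfl
  | succ fuel ih =>
    intro i acc
    rw [pvReplaceGoA, pvStageGoB]
    by_cases hi : i < cs.length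
    · simp only [if_pos hi]
      cases hf : present.find? (fun k => pvStartsAtA cs k.toList i) with
      | none =>
        have hwalk : pvWalkB cs prefixes selected i i [] 0 (cs.length - i) = 0 := by
          have H : ∀ e, 1 ≤ e → i + e ≤ cs.length →
              PySem.Set.contains selected (String.ofList ((cs.drop i).take e)) = false := by
            intro e he1 he2
            rw [← Bool.not_eq_true]
            intro hc
            have hmem := (hsel _).mp hc
            rcases pv_slice_matches cs i e he1 he2 with ⟨_, hmatch, _⟩
            exact absurd hmatch (by simpa using List.find?_eq_none.mp hf _ hmem)
          have := pv_walk_none cs prefixes selected i H (cs.length - i) i 0 le_rfl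
          simpa using this
        rw [hwalk]
        simp only [ne_eq, not_true_eq_false, if_false]
        exact ih _ _
      | some kstar =>
        have hmem : kstar ∈ present := List.mem_of_find?_eq_some hf
        have hpk : pvStartsAtA cs kstar.toList i = true := by
          have := List.find?_some hf; simpa using this
        have hmatch : kstar.toList = (cs.drop i).take kstar.toList.length :=
          (pv_p_iff cs kstar i).mp hpk
        have hL1 : 1 ≤ kstar.toList.length := by
          rcases Nat.eq_zero_or_pos kstar.toList.length with h | h
          · exfalso
            apply hne kstar hmem
            have h0 : kstar.toList = [] := List.length_eq_zero_iff.mp h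
            conv_lhs => rw [← String.ofList_toList (s := kstar), h0]
          · exact h
        have hlen : i + kstar.toList.length ≤ cs.length := by
          have := pv_p_len cs kstar i hpk; omega
        have Hcap : ∀ e, 1 ≤ e → i + e ≤ cs.length →
            PySem.Set.contains selected (String.ofList ((cs.drop i).take e)) = true →
            e ≤ kstar.toList.length := by
          intro e he1 he2 hc
          have hmem' := (hsel _).mp hc
          rcases pv_slice_matches cs i e he1 he2 with ⟨_, hmatch', hlen'⟩
          have := pv_find_max cs present i kstar hpw hf _ hmem' hmatch'
          omega
        have Hsel : PySem.Set.contains selected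
            (String.ofList ((cs.drop i).take kstar.toList.length)) = true := by
          rw [← hmatch, String.ofList_toList]
          exact (hsel _).mpr hmem
        have Hpref : ∀ e, 1 ≤ e → e ≤ kstar.toList.length →
            PySem.Set.contains prefixes (String.ofList ((cs.drop i).take e)) = true := by
          intro e he1 he2
          have : (cs.drop i).take e = kstar.toList.take e := by
            rw [hmatch, List.take_take]
            congr 1
            omega
          rw [this]
          exact hpref kstar hmem e he1 he2
        have hwalk : pvWalkB cs prefixes selected i i [] 0 (cs.length - i)
            = kstar.toList.length := by
          have := pv_walk_reach cs prefixes selected i kstar.toList.length hL1 hlen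
            Hsel Hpref Hcap (cs.length - i) 0 0 (by omega) (by omega)
          simpa using this
        rw [hwalk]
        rw [if_pos (by omega : kstar.toList.length ≠ 0)]
        have hslice : String.ofList ((cs.drop i).take kstar.toList.length) = kstar := by
          rw [← hmatch, String.ofList_toList]
        rw [hslice]
        have hval : cum.getD kstar "" = d.getD kstar "" := by
          apply PySem.Dict.getD_of_mem_items
          · rw [hcum]
            exact List.mem_map.mpr ⟨kstar, hmem, rfl⟩
          · rw [pv_keys_eq d present cum hcum]; exact hnd
        show pvReplaceGoA cs present cum (i + kstar.toList.length) fuel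
            (acc ++ (cum.getD kstar "").toList) = _
        rw [hval]
        exact ih _ _
    · simp only [if_neg hi]

-- one stage: A's replace_text over the cumulative dict = B's trie walk over (selected, prefixes).
theorem pv_stage_eq (text : String) (d : PySem.Dict String String)
    (present : List String) (st : PySem.Set String × PySem.Set String)
    (cum : PySem.Dict String String)
    (hnd : present.Nodup)
    (hpw : present.Pairwise (fun a b => b.toList.length ≤ a.toList.length))
    (hcum : cum.items = present.map (fun k => (k, d.getD k "")))
    (hsel : ∀ s, PySem.Set.contains st.1 s = true ↔ s ∈ present)
    (hpref : ∀ k ∈ present, ∀ e, 1 ≤ e → e ≤ k.toList.length →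
      PySem.Set.contains st.2 (String.ofList (k.toList.take e)) = true)
    (hne : (∀ k ∈ present, k ≠ "") ∨ text = "") :
    pvReplaceTextA text cum
      = String.ofList (pvStageGoB text.toList st.2 st.1 d 0 text.toList.length []) := by
  unfold pvReplaceTextA
  rw [pv_keys_eq d present cum hcum,
    PySem.List.sorted_rev_eq_self_of_pairwise present (fun k => k.toList.length) hpw]
  rcases hne with hne | hte
  · exact congrArg String.ofList (pv_engine_eq text.toList present st.1 st.2 cum d
      hnd hpw hcum hsel hpref hne _ 0 [])
  · subst hte
    rfl

theorem pv_insert_fresh (d : PySem.Dict String String) (present : List String)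
    (cum : PySem.Dict String String) (k : String)
    (hcum : cum.items = present.map (fun j => (j, d.getD j "")))
    (hnotin : k ∉ present) :
    (cum.insert k (d.getD k "")).items = (present ++ [k]).map (fun j => (j, d.getD j "")) := by
  have hkeys : cum.keys = present := by
    simp [PySem.Dict.keys, hcum, List.map_map, Function.comp_def]
  have hnc : cum.contains k = false := by
    rw [← Bool.not_eq_true]
    intro h
    exact hnotin (hkeys ▸ (PySem.Dict.contains_iff_mem_keys cum k).mp h)
  rw [PySem.Dict.items_insert_of_not_contains cum _ hnc, hcum, List.map_append]
  rfl

-- invariant transport: folding pvAddKeyB over hits extends selected/prefixes to present ++ hits.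
theorem pv_fold_sel (present : List String) (st : PySem.Set String × PySem.Set String)
    (hits : List String)
    (hsel : ∀ s, PySem.Set.contains st.1 s = true ↔ s ∈ present) :
    ∀ s, PySem.Set.contains (hits.foldl pvAddKeyB st).1 s = true ↔ s ∈ present ++ hits := by
  intro s
  rw [pv_foldl_addkey_fst, PySem.Set.contains_iff,
    pv_mem_foldl_add (fun k => k) hits st.1 s]
  rw [List.mem_append, ← PySem.Set.contains_iff, hsel]
  constructor
  · rintro (h | ⟨e, he, rfl⟩)
    · exact Or.inl h
    · exact Or.inr he
  · rintro (h | h)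
    · exact Or.inl h
    · exact Or.inr ⟨s, h, rfl⟩

theorem pv_fold_pref (present : List String) (st : PySem.Set String × PySem.Set String)
    (hits : List String)
    (hpref : ∀ k ∈ present, ∀ e, 1 ≤ e → e ≤ k.toList.length →
      PySem.Set.contains st.2 (String.ofList (k.toList.take e)) = true) :
    ∀ k ∈ present ++ hits, ∀ e, 1 ≤ e → e ≤ k.toList.length →
      PySem.Set.contains (hits.foldl pvAddKeyB st).2
        (String.ofList (k.toList.take e)) = true := by
  intro k hk e he1 he2
  rw [pv_foldl_addkey_snd, PySem.Set.contains_iff, pv_mem_preffold]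
  rcases List.mem_append.mp hk with h | h
  · exact Or.inl ((PySem.Set.contains_iff _ _).mp (hpref k h e he1 he2))
  · exact Or.inr ⟨k, h, e - 1, by omega, by congr 1; congr 1; omega⟩

-- the stage loops agree, given the invariants.
theorem pv_stages_eq (text : String) (d : PySem.Dict String String) :
    ∀ (rest present : List String) (cum : PySem.Dict String String)
      (st : PySem.Set String × PySem.Set String),
      cum.items = present.map (fun k => (k, d.getD k "")) →
      (∀ s, PySem.Set.contains st.1 s = true ↔ s ∈ present) →
      (∀ k ∈ present, ∀ e, 1 ≤ e → e ≤ k.toList.length →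
        PySem.Set.contains st.2 (String.ofList (k.toList.take e)) = true) →
      (present ++ rest).Nodup →
      (present ++ rest).Pairwise (fun a b => b.toList.length ≤ a.toList.length) →
      ((∀ k ∈ present ++ rest, k ≠ "") ∨ text = "") →
      pvStagesA text d cum rest = pvStagesB text d st rest := by
  suffices H : ∀ (n : Nat) (rest : List String), rest.length ≤ n →
      ∀ (present : List String) (cum : PySem.Dict String String)
        (st : PySem.Set String × PySem.Set String),
      cum.items = present.map (fun k => (k, d.getD k "")) →
      (∀ s, PySem.Set.contains st.1 s = true ↔ s ∈ present) →
      (∀ k ∈ present, ∀ e, 1 ≤ e → e ≤ k.toList.length →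
        PySem.Set.contains st.2 (String.ofList (k.toList.take e)) = true) →
      (present ++ rest).Nodup →
      (present ++ rest).Pairwise (fun a b => b.toList.length ≤ a.toList.length) →
      ((∀ k ∈ present ++ rest, k ≠ "") ∨ text = "") →
      pvStagesA text d cum rest = pvStagesB text d st rest by
    intro rest; exact H rest.length rest le_rfl
  intro n
  induction n with
  | zero =>
    intro rest hlen present cum st hcum hsel hpref hnd hpw hne
    have : rest = [] := List.length_eq_zero_iff.mp (Nat.le_zero.mp hlen)
    subst this; rfl
  | succ n ih =>
    intro rest hlen present cum st hcum hsel hpref hnd hpw hne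
    match rest with
    | [] => rfl
    | [k1] =>
      rw [pvStagesA, pvStagesB]
      rcases Bool.eq_false_or_eq_true (PySem.Str.isIn k1 text) with b1 | b1
      case inr =>
        simp only [b1, List.take_nil, List.filter_cons, List.filter_nil, if_true,
          Bool.false_eq_true, if_false, List.isEmpty_nil, List.nil_append]
      case inl =>
        have hnotin : k1 ∉ present := by
          intro h
          exact (List.disjoint_of_nodup_append hnd) h (by simp)
        have hndh : (present ++ [k1]).Nodup := by simpa using hnd
        have hpwh : (present ++ [k1]).Pairwise (fun a b => b.toList.length ≤ a.toList.length) := by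
          simpa using hpw
        have hcum1 := pv_insert_fresh d present cum k1 hcum hnotin
        have hneh : (∀ k ∈ present ++ [k1], k ≠ "") ∨ text = "" := by
          rcases hne with h | h
          · exact Or.inl (by simpa using h)
          · exact Or.inr h
        have hstage := pv_stage_eq text d (present ++ [k1]) ([k1].foldl pvAddKeyB st)
          (cum.insert k1 (d.getD k1 "")) hndh hpwh hcum1
          (pv_fold_sel present st [k1] hsel)
          (pv_fold_pref present st [k1] hpref) hneh
        simp only [b1, List.take_nil, List.filter_cons, List.filter_nil, if_true,
          List.isEmpty_cons, List.append_nil, Bool.false_eq_true, if_false]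
        simpa using congrArg (fun s => [s]) hstage
    | k1 :: k2 :: rest2 =>
      rw [pvStagesA, pvStagesB]
      have hnd1 : k1 ∉ present := fun h => (List.disjoint_of_nodup_append hnd) h (by simp)
      have hnd2 : k2 ∉ present := fun h => (List.disjoint_of_nodup_append hnd) h (by simp)
      have hk12 : k1 ≠ k2 := by
        have := hnd.of_append_right
        simp at this
        exact fun h => this.1.1 (h ▸ rfl)
      rcases Bool.eq_false_or_eq_true (PySem.Str.isIn k1 text) with b1 | b1 <;>
        rcases Bool.eq_false_or_eq_true (PySem.Str.isIn k2 text) with b2 | b2 <;>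
        simp only [b1, b2, List.take_succ_cons, List.take_zero, List.filter_cons,
          List.filter_nil, if_true, Bool.false_eq_true, if_false, List.isEmpty_cons,
          List.isEmpty_nil, Bool.or_false, Bool.or_true]
      case inl.inl =>
        -- both keys hit: hits = [k1, k2]
        have hsub : List.Sublist ([k1, k2] ++ rest2) (k1 :: k2 :: rest2) := by simp
        have hnd' : (present ++ ([k1, k2] ++ rest2)).Nodup := by
          refine List.Nodup.sublist ?_ hnd
          exact List.Sublist.append_left hsub present
        have hpw' : (present ++ ([k1, k2] ++ rest2)).Pairwise
            (fun a b => b.toList.length ≤ a.toList.length) := by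
          refine List.Pairwise.sublist ?_ hpw
          exact List.Sublist.append_left hsub present
        have hcum2 : ((cum.insert k1 (d.getD k1 "")).insert k2 (d.getD k2 "")).items
            = (present ++ [k1, k2]).map (fun j => (j, d.getD j "")) := by
          have h1 := pv_insert_fresh d present cum k1 hcum hnd1
          have h2 := pv_insert_fresh d (present ++ [k1]) (cum.insert k1 (d.getD k1 "")) k2 h1
            (by simp [hnd2, Ne.symm hk12])
          simpa using h2
        have hndh : (present ++ [k1, k2]).Nodup := by
          refine List.Nodup.sublist ?_ hnd
          refine List.Sublist.append_left ?_ present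
          exact ((List.nil_sublist rest2).cons₂ k2).cons₂ k1
        have hpwh : (present ++ [k1, k2]).Pairwise
            (fun a b => b.toList.length ≤ a.toList.length) := by
          refine List.Pairwise.sublist ?_ hpw
          refine List.Sublist.append_left ?_ present
          exact ((List.nil_sublist rest2).cons₂ k2).cons₂ k1
        have hneh : (∀ k ∈ present ++ [k1, k2], k ≠ "") ∨ text = "" := by
          rcases hne with h | h
          · refine Or.inl (fun k hk => h k ?_)
            exact (List.Sublist.append_left (((List.nil_sublist rest2).cons₂ k2).cons₂ k1)
              present).mem hk
          · exact Or.inr h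
        have hstage := pv_stage_eq text d (present ++ [k1, k2]) ([k1, k2].foldl pvAddKeyB st)
          ((cum.insert k1 (d.getD k1 "")).insert k2 (d.getD k2 "")) hndh hpwh hcum2
          (pv_fold_sel present st [k1, k2] hsel)
          (pv_fold_pref present st [k1, k2] hpref) hneh
        have hrec := ih rest2 (by simp at hlen ⊢; omega) (present ++ [k1, k2])
          ((cum.insert k1 (d.getD k1 "")).insert k2 (d.getD k2 "")) ([k1, k2].foldl pvAddKeyB st)
          hcum2 (pv_fold_sel present st [k1, k2] hsel) (pv_fold_pref present st [k1, k2] hpref)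
          (by simpa [List.append_assoc] using hnd')
          (by simpa [List.append_assoc] using hpw')
          (by
            rcases hne with h | h
            · refine Or.inl (fun k hk => h k ?_)
              exact (List.Sublist.append_left hsub present).mem
                (by simpa [List.append_assoc] using hk)
            · exact Or.inr h)
        rw [congrArg (fun s => [s]) hstage, hrec]
      case inl.inr =>
        -- only k1 hits: hits = [k1]
        have hsub : List.Sublist ([k1] ++ rest2) (k1 :: k2 :: rest2) :=
          ((List.sublist_cons_self k2 rest2).cons₂ k1)
        have hndh : (present ++ [k1]).Nodup := by
          refine List.Nodup.sublist ?_ hnd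
          refine List.Sublist.append_left ?_ present
          exact (List.nil_sublist _).cons₂ k1
        have hpwh : (present ++ [k1]).Pairwise (fun a b => b.toList.length ≤ a.toList.length) := by
          refine List.Pairwise.sublist ?_ hpw
          refine List.Sublist.append_left ?_ present
          exact (List.nil_sublist _).cons₂ k1
        have hcum1 := pv_insert_fresh d present cum k1 hcum hnd1
        have hneh : (∀ k ∈ present ++ [k1], k ≠ "") ∨ text = "" := by
          rcases hne with h | h
          · refine Or.inl (fun k hk => h k ?_)
            exact (List.Sublist.append_left ((List.nil_sublist _).cons₂ k1) present).mem hk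
          · exact Or.inr h
        have hstage := pv_stage_eq text d (present ++ [k1]) ([k1].foldl pvAddKeyB st)
          (cum.insert k1 (d.getD k1 "")) hndh hpwh hcum1
          (pv_fold_sel present st [k1] hsel)
          (pv_fold_pref present st [k1] hpref) hneh
        have hrec := ih rest2 (by simp at hlen ⊢; omega) (present ++ [k1])
          (cum.insert k1 (d.getD k1 "")) ([k1].foldl pvAddKeyB st)
          hcum1 (pv_fold_sel present st [k1] hsel) (pv_fold_pref present st [k1] hpref)
          (by
            refine List.Nodup.sublist ?_ hnd
            exact List.append_assoc present _ _ ▸ List.Sublist.append_left hsub present)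
          (by
            refine List.Pairwise.sublist ?_ hpw
            exact List.append_assoc present _ _ ▸ List.Sublist.append_left hsub present)
          (by
            rcases hne with h | h
            · refine Or.inl (fun k hk => h k ?_)
              exact (List.Sublist.append_left hsub present).mem
                (by simpa [List.append_assoc] using hk)
            · exact Or.inr h)
        rw [congrArg (fun s => [s]) hstage, hrec]
      case inr.inl =>
        -- only k2 hits: hits = [k2]
        have hsub : List.Sublist ([k2] ++ rest2) (k1 :: k2 :: rest2) :=
          List.Sublist.cons k1 (List.Sublist.cons₂ k2 (List.Sublist.refl rest2))
        have hndh : (present ++ [k2]).Nodup := by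
          refine List.Nodup.sublist ?_ hnd
          refine List.Sublist.append_left ?_ present
          exact List.Sublist.cons k1 ((List.nil_sublist _).cons₂ k2)
        have hpwh : (present ++ [k2]).Pairwise (fun a b => b.toList.length ≤ a.toList.length) := by
          refine List.Pairwise.sublist ?_ hpw
          refine List.Sublist.append_left ?_ present
          exact List.Sublist.cons k1 ((List.nil_sublist _).cons₂ k2)
        have hcum2 := pv_insert_fresh d present cum k2 hcum hnd2
        have hneh : (∀ k ∈ present ++ [k2], k ≠ "") ∨ text = "" := by
          rcases hne with h | h
          · refine Or.inl (fun k hk => h k ?_)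
            exact (List.Sublist.append_left
              (List.Sublist.cons k1 ((List.nil_sublist _).cons₂ k2)) present).mem hk
          · exact Or.inr h
        have hstage := pv_stage_eq text d (present ++ [k2]) ([k2].foldl pvAddKeyB st)
          (cum.insert k2 (d.getD k2 "")) hndh hpwh hcum2
          (pv_fold_sel present st [k2] hsel)
          (pv_fold_pref present st [k2] hpref) hneh
        have hrec := ih rest2 (by simp at hlen ⊢; omega) (present ++ [k2])
          (cum.insert k2 (d.getD k2 "")) ([k2].foldl pvAddKeyB st)
          hcum2 (pv_fold_sel present st [k2] hsel) (pv_fold_pref present st [k2] hpref)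
          (by
            refine List.Nodup.sublist ?_ hnd
            exact List.append_assoc present _ _ ▸ List.Sublist.append_left hsub present)
          (by
            refine List.Pairwise.sublist ?_ hpw
            exact List.append_assoc present _ _ ▸ List.Sublist.append_left hsub present)
          (by
            rcases hne with h | h
            · refine Or.inl (fun k hk => h k ?_)
              exact (List.Sublist.append_left hsub present).mem
                (by simpa [List.append_assoc] using hk)
            · exact Or.inr h)
        rw [congrArg (fun s => [s]) hstage, hrec]
      case inr.inr =>
        -- neither key hits: hits = []
        have hsub : List.Sublist rest2 (k1 :: k2 :: rest2) :=
          List.Sublist.cons k1 (List.Sublist.cons k2 (List.Sublist.refl rest2))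
        simp only [List.foldl_nil, List.nil_append]
        apply ih rest2 (by simp at hlen ⊢; omega) present cum st hcum hsel hpref
        · exact List.Nodup.sublist (List.Sublist.append_left hsub present) hnd
        · exact List.Pairwise.sublist (List.Sublist.append_left hsub present) hpw
        · rcases hne with h | h
          · exact Or.inl (fun k hk => h k ((List.Sublist.append_left hsub present).mem hk))
          · exact Or.inr h

-- ===== VERDICT (by name: the statement is the Claim_ definition above) =====
theorem convert_from_chosen_map_spec : Claim_equal_convert_from_chosen_map := by
  intro text chosen_map _hdom hpre
  unfold Spec_convert_from_chosen_map convert_from_chosen_map convert_from_chosen_map_alt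
  simp only []
  refine pv_stages_eq text (PySem.Dict.ofList chosen_map) _ [] PySem.Dict.empty
    (PySem.Set.empty, PySem.Set.empty) ?_ ?_ ?_ ?_ ?_ ?_
  · simp [PySem.Dict.empty]
  · intro s
    simp [PySem.Set.empty]
  · intro k hk
    simp at hk
  · simpa using ((PySem.List.sorted_perm (PySem.Dict.ofList chosen_map).keys
      (fun k => k.toList.length) true).symm.nodup (PySem.Dict.nodup_keys_ofList chosen_map))
  · simpa using PySem.List.sorted_pairwise_rev (PySem.Dict.ofList chosen_map).keys
      (fun k => k.toList.length)
  · rcases hpre with hpre | hpre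
    · left
      intro k hk
      simp only [List.nil_append] at hk
      have hk' : k ∈ (PySem.Dict.ofList chosen_map).keys :=
        (PySem.List.mem_sorted _ _ _ _).mp hk
      have e : (PySem.Dict.ofList chosen_map)
          = chosen_map.foldl (fun d p => d.insert p.1 p.2) PySem.Dict.empty := rfl
      rw [e, PySem.Dict.keys_foldl_insert_key] at hk'
      rcases (PySem.Set.mem_update _ _ _).mp hk' with h' | h'
      · simp [PySem.Dict.keys_empty] at h'
      · rcases List.mem_map.mp h' with ⟨p, hp, rfl⟩
        exact hpre p hp
    · exact Or.inr hpre
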